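-- pv_equiv track=rewrite | github.com/Hamsandwich28/pairmaker | PairmakerModule/pairmaker_handler.py | _key_values_dict
-- ===== SOURCE A (Python) =====
-- def _key_values_dict(obj: list, basename: str, amount: int) -> dict:
--     result = {
--         basename + str(1): None,
--         basename + str(2): None
--     }
--     posted = 0
--     for row in obj:
--         if row:
--             result[basename + str(posted + 1)] = row
--             posted += 1
--         if posted == amount:
--             break
--     return result
-- ===== SOURCE B (Python) =====
-- def _key_values_dict(obj: list, basename: str, amount: int) -> dict:
--     result = {basename + "1": None, basename + "2": None}
--     rows = [row for row in obj if row]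
--     if amount >= 0:
--         rows = rows[:amount]
--     for i, row in enumerate(rows):
--         result[basename + str(i + 1)] = row
--     return result
-- ===== Notes on version B (the rewrite author's own statement) =====
-- stated objective: simpler
-- what changed: Replaces the single scan with an early-exit break and a running 'posted' counter by a filter-then-truncate-then-enumerate decomposition: collect the non-empty rows, slice off the first max(amount,0) of them when amount is non-negative, and assign them to numbered keys.
-- intended difference: When amount == 0 and the first element of obj is a non-empty string, A's break never fires (posted jumps to 1 immediately) so A returns ALL non-empty rows, while B returns just the two None defaults; taking zero rows is the intended meaning of amount == 0. — e.g. on _key_values_dict([some "x"], "k", 0): A returns [("k1", some "x"), ("k2", none)], B returns [("k1", none), ("k2", none)]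
import Mathlib
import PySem

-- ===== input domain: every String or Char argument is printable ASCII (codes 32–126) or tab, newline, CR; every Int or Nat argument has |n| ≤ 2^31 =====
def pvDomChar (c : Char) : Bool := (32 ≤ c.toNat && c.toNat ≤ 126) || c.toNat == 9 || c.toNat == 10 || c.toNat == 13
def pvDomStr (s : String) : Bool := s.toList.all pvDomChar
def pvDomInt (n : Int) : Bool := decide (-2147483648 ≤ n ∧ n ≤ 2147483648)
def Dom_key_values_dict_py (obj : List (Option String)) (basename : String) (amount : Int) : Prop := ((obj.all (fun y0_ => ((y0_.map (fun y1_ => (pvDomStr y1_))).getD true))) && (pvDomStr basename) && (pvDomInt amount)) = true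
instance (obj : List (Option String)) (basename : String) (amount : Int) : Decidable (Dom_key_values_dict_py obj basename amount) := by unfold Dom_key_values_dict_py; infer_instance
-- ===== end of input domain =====

-- B replaces A's early-exit scan with a filter / truncate / enumerate decomposition (objective: simpler);
-- on amount == 0 with a truthy first row B intentionally returns the None defaults where A returns all rows (see D_).

-- ===== PORT A =====
-- the for-loop of A: state = (dict, posted), break when posted == amount after a row
def pvLoopA (basename : String) (amount : Int) :
    List (Option String) → PySem.Dict String (Option String) → Int → PySem.Dict String (Option String)
  | [], d, _ => d
  | row :: rest, d, posted =>
    let st := if (match row with | none => false | some s => !(s == "")) then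
        (d.insert (basename ++ PySem.Int.toStr (posted + 1)) row, posted + 1)
      else (d, posted)
    if st.2 == amount then st.1 else pvLoopA basename amount rest st.1 st.2

def key_values_dict_py (obj : List (Option String)) (basename : String) (amount : Int) : List (String × Option String) :=
  let result := (PySem.Dict.empty.insert (basename ++ PySem.Int.toStr 1) (none : Option String)).insert
      (basename ++ PySem.Int.toStr 2) none
  (pvLoopA basename amount obj result 0).items

-- ===== PORT B =====
-- 'for i, row in enumerate(rows): result[basename + str(i + 1)] = row'
def pvFillB (basename : String) :
    List (Option String) → PySem.Dict String (Option String) → Int → PySem.Dict String (Option String)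
  | [], d, _ => d
  | row :: rest, d, i => pvFillB basename rest (d.insert (basename ++ PySem.Int.toStr (i + 1)) row) (i + 1)

def key_values_dict_py_alt (obj : List (Option String)) (basename : String) (amount : Int) : List (String × Option String) :=
  let result := (PySem.Dict.empty.insert (basename ++ PySem.Int.toStr 1) (none : Option String)).insert
      (basename ++ PySem.Int.toStr 2) none
  let rows := obj.filter (fun row => match row with | none => false | some s => !(s == ""))
  let rows := if 0 ≤ amount then rows.take amount.toNat else rows
  (pvFillB basename rows result 0).items

-- ===== PRECONDITION & SPEC =====
-- When amount == 0 and obj's first element is a non-empty string, A's break never fires and A returns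
-- all non-empty rows; B returns the two None defaults, the intended meaning of amount == 0.
def D_key_values_dict_py (obj : List (Option String)) (basename : String) (amount : Int) : Prop :=
  amount = 0 ∧ (obj.head?.getD none).getD "" ≠ ""
instance (obj : List (Option String)) (basename : String) (amount : Int) : Decidable (D_key_values_dict_py obj basename amount) := by unfold D_key_values_dict_py; infer_instance

def Spec_key_values_dict_py (obj : List (Option String)) (basename : String) (amount : Int) (out : List (String × Option String)) : Prop := ¬ D_key_values_dict_py obj basename amount → out = key_values_dict_py_alt obj basename amount
instance (obj : List (Option String)) (basename : String) (amount : Int) (out : List (String × Option String)) : Decidable (Spec_key_values_dict_py obj basename amount out) := by unfold Spec_key_values_dict_py; infer_instance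

def pvDiffWitness_key_values_dict_py : List (Option String) × String × Int := ([some "x"], "k", 0)
def pvDiffWitnessOut_key_values_dict_py : (List (String × Option String)) × (List (String × Option String)) :=
  ([("k1", some "x"), ("k2", none)], [("k1", none), ("k2", none)])

-- ===== CLAIM (what is proved, stated in full; the proofs are below) =====
def Claim_unchanged_key_values_dict_py : Prop := ∀ (obj : List (Option String)) (basename : String) (amount : Int), Dom_key_values_dict_py obj basename amount → Spec_key_values_dict_py obj basename amount (key_values_dict_py obj basename amount)
def Claim_exact_key_values_dict_py : Prop := ∀ (obj : List (Option String)) (basename : String) (amount : Int), Dom_key_values_dict_py obj basename amount → D_key_values_dict_py obj basename amount → key_values_dict_py obj basename amount ≠ key_values_dict_py_alt obj basename amount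
def Claim_changed_key_values_dict_py : Prop := Dom_key_values_dict_py (pvDiffWitness_key_values_dict_py.1) (pvDiffWitness_key_values_dict_py.2.1) (pvDiffWitness_key_values_dict_py.2.2) ∧ D_key_values_dict_py (pvDiffWitness_key_values_dict_py.1) (pvDiffWitness_key_values_dict_py.2.1) (pvDiffWitness_key_values_dict_py.2.2) ∧ key_values_dict_py (pvDiffWitness_key_values_dict_py.1) (pvDiffWitness_key_values_dict_py.2.1) (pvDiffWitness_key_values_dict_py.2.2) = pvDiffWitnessOut_key_values_dict_py.1 ∧ key_values_dict_py_alt (pvDiffWitness_key_values_dict_py.1) (pvDiffWitness_key_values_dict_py.2.1) (pvDiffWitness_key_values_dict_py.2.2) = pvDiffWitnessOut_key_values_dict_py.2 ∧ pvDiffWitnessOut_key_values_dict_py.1 ≠ pvDiffWitnessOut_key_values_dict_py.2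

-- ===== LEMMAS AND PROOFS =====

-- the Python truthiness test A and B both apply to a row
def pvTruthy (row : Option String) : Bool := match row with | none => false | some s => !(s == "")

-- the list of rows A actually posts, from state 'posted'
def pvTakeA (amount : Int) : List (Option String) → Int → List (Option String)
  | [], _ => []
  | row :: rest, posted =>
    if pvTruthy row then
      if posted + 1 = amount then [row] else row :: pvTakeA amount rest (posted + 1)
    else
      if posted = amount then [] else pvTakeA amount rest posted

theorem pvLoopA_eq_fillB (basename : String) (amount : Int) :
    ∀ (rest : List (Option String)) (d : PySem.Dict String (Option String)) (posted : Int),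
      pvLoopA basename amount rest d posted = pvFillB basename (pvTakeA amount rest posted) d posted := by
  intro rest
  induction rest with
  | nil => intro d posted; rfl
  | cons row rest ih =>
    intro d posted
    have hm : (match row with | none => false | some s => !(s == "")) = pvTruthy row := rfl
    simp only [pvLoopA, pvTakeA, hm]
    by_cases ht : pvTruthy row
    · simp only [ht, if_true]
      by_cases hb : posted + 1 = amount
      · have : ((posted + 1 : Int) == amount) = true := by simp [hb]
        simp [this, hb, pvFillB]
      · have : ((posted + 1 : Int) == amount) = false := by simp [hb]
        simp [this, hb, pvFillB, ih]
    · simp only [ht, if_false]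
      by_cases hb : posted = amount
      · have : ((posted : Int) == amount) = true := by simp [hb]
        simp [this, hb, pvFillB]
      · have : ((posted : Int) == amount) = false := by simp [hb]
        simp [this, hb, ih]

theorem pvTakeA_pos (amount : Int) :
    ∀ (rest : List (Option String)) (posted : Int), posted < amount →
      pvTakeA amount rest posted = (rest.filter pvTruthy).take (amount - posted).toNat := by
  intro rest
  induction rest with
  | nil => intro posted _; simp [pvTakeA]
  | cons row rest ih =>
    intro posted h
    by_cases ht : pvTruthy row
    · by_cases hb : posted + 1 = amount
      · have h1 : (amount - posted).toNat = 1 := by omega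
        simp [pvTakeA, ht, hb, h1, List.filter_cons]
      · have h2 : (amount - posted).toNat = (amount - (posted + 1)).toNat + 1 := by omega
        simp [pvTakeA, ht, hb, List.filter_cons, h2, ih (posted + 1) (by omega)]
    · have hb : posted ≠ amount := by omega
      simp [pvTakeA, ht, hb, List.filter_cons, ih posted h]

theorem pvTakeA_neg (amount : Int) :
    ∀ (rest : List (Option String)) (posted : Int), amount < posted →
      pvTakeA amount rest posted = rest.filter pvTruthy := by
  intro rest
  induction rest with
  | nil => intro posted _; simp [pvTakeA]
  | cons row rest ih =>
    intro posted h
    by_cases ht : pvTruthy row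
    · have hb : posted + 1 ≠ amount := by omega
      simp [pvTakeA, ht, hb, List.filter_cons, ih (posted + 1) (by omega)]
    · have hb : posted ≠ amount := by omega
      simp [pvTakeA, ht, hb, List.filter_cons, ih posted h]

-- inside D_: A's items keep a 'some' value at position 0, B's defaults keep 'none' there

theorem pvHeadSome (basename : String) :
    ∀ (rows : List (Option String)) (d : PySem.Dict String (Option String)) (i : Int),
      (∀ r ∈ rows, pvTruthy r = true) →
      (∃ k v, d.items.head? = some (k, some v)) →
      ∃ k v, (pvFillB basename rows d i).items.head? = some (k, some v) := by
  intro rows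
  induction rows with
  | nil => intro d i _ h; simpa [pvFillB] using h
  | cons r rest ih =>
    intro d i hall h
    obtain ⟨k, v, hk⟩ := h
    obtain ⟨t, rfl⟩ : ∃ t, r = some t := by
      have hr := hall r (by simp)
      cases r with
      | none => simp [pvTruthy] at hr
      | some t => exact ⟨t, rfl⟩
    obtain ⟨tl, hitems⟩ : ∃ tl, d.items = (k, some v) :: tl := by
      cases hd : d.items with
      | nil => rw [hd] at hk; simp at hk
      | cons p tl =>
        rw [hd] at hk
        simp only [List.head?_cons, Option.some.injEq] at hk
        exact ⟨tl, by rw [← hk]⟩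
    simp only [pvFillB]
    apply ih _ _ (fun r hr => hall r (by simp [hr]))
    rw [PySem.Dict.items_insert, hitems]
    by_cases hc : d.contains (basename ++ PySem.Int.toStr (i + 1)) = true
    · rw [if_pos hc]
      by_cases hkk : k = basename ++ PySem.Int.toStr (i + 1)
      · exact ⟨basename ++ PySem.Int.toStr (i + 1), t, by simp [hkk]⟩
      · exact ⟨k, v, by simp [hkk]⟩
    · rw [if_neg hc]
      exact ⟨k, v, by simp⟩

theorem pvResultHead (basename : String) :
    ∃ tl, ((PySem.Dict.empty.insert (basename ++ PySem.Int.toStr 1) (none : Option String)).insert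
      (basename ++ PySem.Int.toStr 2) none).items = (basename ++ PySem.Int.toStr 1, (none : Option String)) :: tl := by
  have h1 : (PySem.Dict.empty.insert (basename ++ PySem.Int.toStr 1) (none : Option String)).items
      = [(basename ++ PySem.Int.toStr 1, (none : Option String))] := by
    rw [PySem.Dict.items_insert]
    simp [PySem.Dict.contains_empty]
    rfl
  rw [PySem.Dict.items_insert, h1]
  by_cases hc : (PySem.Dict.empty.insert (basename ++ PySem.Int.toStr 1) (none : Option String)).contains
      (basename ++ PySem.Int.toStr 2) = true
  · rw [if_pos hc]
    by_cases hkk : basename ++ PySem.Int.toStr 1 = basename ++ PySem.Int.toStr 2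
    · exact ⟨[], by simp [hkk]⟩
    · exact ⟨[], by simp [hkk]⟩
  · rw [if_neg hc]
    exact ⟨[(basename ++ PySem.Int.toStr 2, none)], by simp⟩

-- ===== VERDICT (by name: the statement is the Claim_ definition above) =====
theorem key_values_dict_py_spec : Claim_unchanged_key_values_dict_py := by
  intro obj basename amount _ hnd
  unfold key_values_dict_py key_values_dict_py_alt
  dsimp only
  rw [show (List.filter (fun row => match row with | none => false | some s => !(s == "")) obj) = obj.filter pvTruthy from rfl]
  rw [pvLoopA_eq_fillB]
  have hrows : pvTakeA amount obj 0 = (if 0 ≤ amount then List.take amount.toNat (obj.filter pvTruthy) else obj.filter pvTruthy) := ?_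
  · rw [hrows]
  rcases lt_trichotomy amount 0 with hlt | heq | hgt
  · rw [pvTakeA_neg amount obj 0 hlt, if_neg (by omega)]
  · subst heq
    rw [if_pos le_rfl]
    have : pvTakeA 0 obj 0 = [] := by
      cases obj with
      | nil => rfl
      | cons row rest =>
        have hfalse : pvTruthy row = false := by
          unfold D_key_values_dict_py at hnd
          push Not at hnd
          have h := hnd rfl
          cases row with
          | none => rfl
          | some s =>
            simp only [List.head?, Option.getD] at h
            simp [pvTruthy, h]
        simp [pvTakeA, hfalse]
    simp [this]
  · rw [pvTakeA_pos amount obj 0 hgt, if_pos (by omega)]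
    simp

theorem key_values_dict_py_changed : Claim_changed_key_values_dict_py := by
  unfold Claim_changed_key_values_dict_py; decide

theorem key_values_dict_py_tight : Claim_exact_key_values_dict_py := by
  intro obj basename amount _ hd heq
  obtain ⟨ha, hh⟩ := hd
  subst ha
  obtain ⟨s, rest, rfl, hs⟩ : ∃ s rest, obj = some s :: rest ∧ s ≠ "" := by
    cases obj with
    | nil => simp at hh
    | cons r rest =>
      cases r with
      | none => simp at hh
      | some s => exact ⟨s, rest, rfl, by simpa using hh⟩
  unfold key_values_dict_py key_values_dict_py_alt at heq
  dsimp only at heq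
  rw [pvLoopA_eq_fillB] at heq
  simp only [show Int.toNat 0 = 0 from rfl, List.take_zero, le_refl, ite_true] at heq
  rw [show ∀ d : PySem.Dict String (Option String), pvFillB basename [] d 0 = d from fun _ => rfl] at heq
  -- the taken rows are  some s :: rest.filter pvTruthy
  have hts : pvTruthy (some s) = true := by simp [pvTruthy, hs]
  have htake : pvTakeA 0 (some s :: rest) 0 = some s :: rest.filter pvTruthy := by
    have h1 : ((0 : Int) + 1 = 0) = False := by simp
    simp only [pvTakeA, hts, if_true, h1, if_false]
    simp [pvTakeA_neg 0 rest 1 (by omega)]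
  rw [htake] at heq
  obtain ⟨tl, hres⟩ := pvResultHead basename
  -- after the first insert the head pair carries the value  some s
  have hcont : ((PySem.Dict.empty.insert (basename ++ PySem.Int.toStr 1) (none : Option String)).insert
      (basename ++ PySem.Int.toStr 2) none).contains (basename ++ PySem.Int.toStr (0 + 1)) = true := by
    rw [show ((0 : Int) + 1) = 1 by norm_num]
    rw [PySem.Dict.contains_iff_mem_keys]
    simp only [PySem.Dict.keys, hres]
    simp
  have hA : ∃ k v, (pvFillB basename (some s :: rest.filter pvTruthy)
      ((PySem.Dict.empty.insert (basename ++ PySem.Int.toStr 1) (none : Option String)).insert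
        (basename ++ PySem.Int.toStr 2) none) 0).items.head? = some (k, some v) := by
    simp only [pvFillB]
    apply pvHeadSome basename _ _ _ (fun r hr => (List.mem_filter.mp hr).2)
    refine ⟨basename ++ PySem.Int.toStr (0 + 1), s, ?_⟩
    rw [PySem.Dict.items_insert, if_pos hcont, hres]
    rw [show ((0 : Int) + 1) = 1 by norm_num]
    simp
  obtain ⟨k, v, hA⟩ := hA
  rw [heq, hres] at hA
  simp at hA
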